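-- pv_equiv track=rewrite | github.com/HrvojeFER/ppj-lab | LAB3/SemantickiAnalizator.py | special_split
-- ===== SOURCE A (Python) =====
-- def special_split(string: str):
--     to_return = list()
--     buffer = ""
--     is_in_quote = False
--
--     for character in string:
--         if not is_in_quote and character is "\n":
--             to_return.append(buffer)
--             buffer = ""
--             continue
--
--         if character is '"':
--             is_in_quote = not is_in_quote
--
--         buffer += character
--
--     if len(buffer) is not 0:
--         to_return.append(buffer)
--
--     return to_return
-- ===== SOURCE B (Python) =====
-- def special_split(string: str):
--     result = []
--     buffer = ""
--     segments = string.split('"')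
--     last = len(segments) - 1
--     for i, seg in enumerate(segments):
--         if i % 2 == 0:
--             parts = seg.split('\n')
--             buffer += parts[0]
--             for p in parts[1:]:
--                 result.append(buffer)
--                 buffer = p
--         else:
--             buffer += seg
--         if i != last:
--             buffer += '"'
--     if buffer:
--         result.append(buffer)
--     return result
-- ===== Notes on version B (the rewrite author's own statement) =====
-- stated objective: faster
-- what changed: Replaces A's char-by-char state machine (with O(n) string += per character) by a single split on '"' into alternating outside/inside regions, splitting only even-indexed regions on '\n' and re-inserting the removed quotes into the running buffer.
import Mathlib
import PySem

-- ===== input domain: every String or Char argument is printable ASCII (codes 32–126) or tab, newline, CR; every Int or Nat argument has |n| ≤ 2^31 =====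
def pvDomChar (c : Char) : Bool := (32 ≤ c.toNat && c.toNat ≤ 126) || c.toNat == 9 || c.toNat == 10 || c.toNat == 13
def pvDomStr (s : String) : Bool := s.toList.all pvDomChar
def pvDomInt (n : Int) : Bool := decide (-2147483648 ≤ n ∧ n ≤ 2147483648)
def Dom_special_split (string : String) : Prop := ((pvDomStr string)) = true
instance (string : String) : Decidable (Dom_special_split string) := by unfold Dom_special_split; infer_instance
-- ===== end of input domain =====

-- B splits the input once on '"' (alternating outside/inside regions) and splits only the
-- even-indexed regions on '\n'; same return value as A's char-by-char state machine.

-- ===== PORT A =====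
-- A's loop state: (to_return, buffer, is_in_quote); buffer kept as List Char.
def pvStepA (st : List String × List Char × Bool) (c : Char) : List String × List Char × Bool :=
  let (tr, buf, q) := st
  if !q && c = '\n' then (tr ++ [String.ofList buf], [], q)
  else if c = '"' then (tr, buf ++ [c], !q)
  else (tr, buf ++ [c], q)

def special_split (string : String) : List String :=
  let (tr, buf, _) := string.toList.foldl pvStepA ([], [], false)
  if buf.length ≠ 0 then tr ++ [String.ofList buf] else tr

-- ===== PORT B =====
-- str.split(c) for a single-character separator (same result as Python's split).
def pvSplitCh (c : Char) : List Char → List (List Char)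
  | [] => [[]]
  | a :: t =>
    if a = c then [] :: pvSplitCh c t
    else match pvSplitCh c t with
         | [] => [[a]]          -- unreachable: pvSplitCh never returns []
         | h :: r => (a :: h) :: r

-- the loop over segments; `ev` = current index is even (outside quotes)
def pvGoB : Bool → List String → List Char → List (List Char) → List String × List Char
  | _, acc, buf, [] => (acc, buf)
  | ev, acc, buf, seg :: rest =>
    let st :=
      if ev then
        match pvSplitCh '\n' seg with
        | [] => (acc, buf)     -- unreachable
        | p :: ps => ps.foldl (fun st p' => (st.1 ++ [String.ofList st.2], p')) (acc, buf ++ p)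
      else (acc, buf ++ seg)
    match rest with
    | [] => st
    | _ :: _ => pvGoB (!ev) st.1 (st.2 ++ ['"']) rest

def special_split_alt (string : String) : List String :=
  let (acc, buf) := pvGoB true [] [] (pvSplitCh '"' string.toList)
  if buf ≠ [] then acc ++ [String.ofList buf] else acc

-- ===== PRECONDITION & SPEC =====
def Spec_special_split (string : String) (out : List String) : Prop := out = special_split_alt string
instance (string : String) (out : List String) : Decidable (Spec_special_split string out) := by unfold Spec_special_split; infer_instance

-- ===== CLAIM (what is proved, stated in full; the proofs are below) =====
def Claim_equal_special_split : Prop := ∀ (string : String), Dom_special_split string → Spec_special_split string (special_split string)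

-- ===== LEMMAS AND PROOFS =====

lemma pvSplitCh_ne_nil (c : Char) (l : List Char) : pvSplitCh c l ≠ [] := by
  cases l with
  | nil => simp [pvSplitCh]
  | cons a t =>
    simp only [pvSplitCh]
    split
    · simp
    · rcases h : pvSplitCh c t with _ | ⟨h', r⟩ <;> simp

-- pushing one non-quote, non-newline-relevant char into the head segment
lemma pvGoB_cons_char (ev : Bool) (acc : List String) (buf : List Char) (a : Char)
    (h : List Char) (r : List (List Char))
    (ha : ev = true → a ≠ '\n') :
    pvGoB ev acc buf ((a :: h) :: r) = pvGoB ev acc (buf ++ [a]) (h :: r) := by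
  cases ev with
  | false => simp [pvGoB, List.append_assoc]
  | true =>
    have ha' := ha rfl
    rcases hn : pvSplitCh '\n' h with _ | ⟨p, ps⟩
    · exact absurd hn (pvSplitCh_ne_nil _ _)
    · simp [pvGoB, pvSplitCh, ha', hn, List.append_assoc]

lemma pvGoB_cons_newline (acc : List String) (buf : List Char)
    (h : List Char) (r : List (List Char)) :
    pvGoB true acc buf (('\n' :: h) :: r) = pvGoB true (acc ++ [String.ofList buf]) [] (h :: r) := by
  rcases hn : pvSplitCh '\n' h with _ | ⟨p, ps⟩
  · exact absurd hn (pvSplitCh_ne_nil _ _)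
  · simp [pvGoB, pvSplitCh, hn, List.foldl]

lemma pvGoB_main (l : List Char) : ∀ (q : Bool) (acc : List String) (buf : List Char),
    pvGoB (!q) acc buf (pvSplitCh '"' l) =
      ((l.foldl pvStepA (acc, buf, q)).1, (l.foldl pvStepA (acc, buf, q)).2.1) := by
  induction l with
  | nil => intro q acc buf; cases q <;> simp [pvSplitCh, pvGoB]
  | cons a t ih =>
    intro q acc buf
    by_cases haq : a = '"'
    · subst haq
      have hne := pvSplitCh_ne_nil '"' t
      rcases hq : pvSplitCh '"' t with _ | ⟨h, r⟩
      · exact absurd hq hne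
      · have step : pvGoB (!q) acc buf (pvSplitCh '"' ('"' :: t))
            = pvGoB (!(!q)) acc (buf ++ ['"']) (h :: r) := by
          cases q <;> simp [pvSplitCh, pvGoB, hq, List.foldl]
        rw [step, ← hq, ih (!q) acc (buf ++ ['"'])]
        cases q <;> simp [List.foldl, pvStepA]
    · rcases hq : pvSplitCh '"' t with _ | ⟨h, r⟩
      · exact absurd hq (pvSplitCh_ne_nil _ _)
      · have hsp : pvSplitCh '"' (a :: t) = (a :: h) :: r := by
          simp [pvSplitCh, haq, hq]
        by_cases han : q = false ∧ a = '\n'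
        · obtain ⟨hqf, han'⟩ := han
          subst hqf; subst han'
          rw [hsp]
          simp only [Bool.not_false]
          rw [pvGoB_cons_newline, ← hq]
          have ih' := ih false (acc ++ [String.ofList buf]) []
          simp only [Bool.not_false] at ih'
          rw [ih']
          simp [List.foldl, pvStepA]
        · have hstep : pvStepA (acc, buf, q) a = (acc, buf ++ [a], q) := by
            simp [pvStepA, haq]
            intro h1 h2
            cases q with
            | false => exact absurd ⟨rfl, h2⟩ han
            | true => simp at h1
          rw [hsp]
          rw [pvGoB_cons_char (!q) acc buf a h r, ← hq, ih q acc (buf ++ [a])]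
          · simp [List.foldl, hstep]
          · intro hqe
            cases q with
            | true => simp at hqe
            | false => intro hc; exact han ⟨rfl, hc⟩

-- ===== VERDICT (by name: the statement is the Claim_ definition above) =====
theorem special_split_spec : Claim_equal_special_split := by
  intro s _
  unfold Spec_special_split special_split special_split_alt
  have h := pvGoB_main s.toList false [] []
  simp only [Bool.not_false] at h
  rw [h]
  rcases s.toList.foldl pvStepA ([], [], false) with ⟨tr, buf, q⟩
  by_cases hb : buf = [] <;> simp [hb]
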